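-- pv_equiv track=rewrite | github.com/wuodar/sda_python_datascience | block_8/dictionary.py | get_keys_with_largest_values2
-- ===== SOURCE A (Python) =====
-- from typing import Dict, List, Any
--
-- def get_keys_with_largest_values2(input_dict: Dict[Any, int]) -> List[Any]:
--     sorted_values = sorted(input_dict.values())
--     sorted_dict = dict()
--
--     for val in sorted_values:
--         for key in input_dict:
--             if input_dict[key] == val:
--                 sorted_dict[key] = input_dict[key]
--                 break
--
--     sorted_keys = list(sorted_dict.keys())
--     return sorted_keys[-3:]
-- ===== SOURCE B (Python) =====
-- def get_keys_with_largest_values2(input_dict):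
--     first_key = {}
--     for key, val in input_dict.items():
--         if val not in first_key:
--             first_key[val] = key
--     top = sorted(first_key)[-3:]
--     return [first_key[val] for val in top]
-- ===== Notes on version B (the rewrite author's own statement) =====
-- stated objective: faster
-- what changed: Replaces A's nested loops (for every sorted value, rescan the whole dict for the first key with that value) by a single pass that maps each distinct value to its first key, then sorts the distinct values once and takes the top 3.
import Mathlib
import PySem

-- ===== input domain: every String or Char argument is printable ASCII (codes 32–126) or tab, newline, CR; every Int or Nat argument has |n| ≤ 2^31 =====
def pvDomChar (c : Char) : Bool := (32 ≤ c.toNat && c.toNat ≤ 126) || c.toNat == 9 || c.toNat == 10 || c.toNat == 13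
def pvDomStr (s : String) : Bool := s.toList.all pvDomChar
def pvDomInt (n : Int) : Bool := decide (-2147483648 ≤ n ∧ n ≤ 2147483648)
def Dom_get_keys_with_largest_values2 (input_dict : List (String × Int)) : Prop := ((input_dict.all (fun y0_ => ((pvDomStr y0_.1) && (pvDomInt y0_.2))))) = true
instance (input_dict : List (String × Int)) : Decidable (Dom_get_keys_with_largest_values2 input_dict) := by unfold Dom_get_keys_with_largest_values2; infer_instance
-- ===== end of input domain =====

-- B replaces A's nested rescans by one first-key-per-value pass plus one sort of the distinct values.

-- ===== PORT A =====
-- inner loop 'for key in input_dict: if input_dict[key] == val: sorted_dict[key] = input_dict[key]; break'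
-- iterated over the dict's items (exact: looking up a dict's own key yields the paired value)
def pvScanBreak (items : List (String × Int)) (sd : PySem.Dict String Int) (val : Int) : PySem.Dict String Int :=
  match items with
  | [] => sd
  | (k, v) :: rest => if v == val then sd.insert k v else pvScanBreak rest sd val

def get_keys_with_largest_values2 (input_dict : List (String × Int)) : List String :=
  let d := PySem.Dict.ofList input_dict
  let sorted_values := PySem.List.sorted d.values (fun v => v) false
  let sorted_dict := sorted_values.foldl (fun sd val => pvScanBreak d.items sd val) PySem.Dict.empty
  let sorted_keys := sorted_dict.keys
  PySem.List.slice sorted_keys (some (-3)) none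

-- ===== PORT B =====
def get_keys_with_largest_values2_alt (input_dict : List (String × Int)) : List String :=
  let d := PySem.Dict.ofList input_dict
  let first_key := d.items.foldl
    (fun fk kv => if fk.contains kv.2 then fk else fk.insert kv.2 kv.1)
    (PySem.Dict.empty : PySem.Dict Int String)
  let top := PySem.List.slice (PySem.List.sorted first_key.keys (fun v => v) false) (some (-3)) none
  top.map (fun v => (first_key.get? v).getD "")

-- ===== PRECONDITION & SPEC =====
def Spec_get_keys_with_largest_values2 (input_dict : List (String × Int)) (out : List String) : Prop := out = get_keys_with_largest_values2_alt input_dict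
instance (input_dict : List (String × Int)) (out : List String) : Decidable (Spec_get_keys_with_largest_values2 input_dict out) := by unfold Spec_get_keys_with_largest_values2; infer_instance

-- ===== CLAIM (what is proved, stated in full; the proofs are below) =====
def Claim_equal_get_keys_with_largest_values2 : Prop := ∀ (input_dict : List (String × Int)), Dom_get_keys_with_largest_values2 input_dict → Spec_get_keys_with_largest_values2 input_dict (get_keys_with_largest_values2 input_dict)

-- ===== LEMMAS AND PROOFS =====

-- first key of L whose value is v (as A's inner scan finds it)
def pvGKey (L : List (String × Int)) (v : Int) : String :=
  (((L.find? (fun p => p.2 == v)).map (fun p => p.1)).getD "")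

lemma pvFind_eq (L : List (String × Int)) (v : Int) (hv : v ∈ L.map (fun p => p.2)) :
    L.find? (fun p => p.2 == v) = some (pvGKey L v, v) := by
  obtain ⟨p, hp, hps⟩ := List.mem_map.mp hv
  have hsome : (L.find? (fun p => p.2 == v)).isSome := by
    rw [List.find?_isSome]
    exact ⟨p, hp, by simp [hps]⟩
  obtain ⟨q, hq⟩ := Option.isSome_iff_exists.mp hsome
  have hq2 : q.2 = v := by simpa using List.find?_some hq
  have hk : pvGKey L v = q.1 := by simp [pvGKey, hq]
  rw [hq, hk, ← hq2]

lemma pvGKey_inj (L : List (String × Int)) (hnd : (L.map (fun p => p.1)).Nodup)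
    {v w : Int} (hv : v ∈ L.map (fun p => p.2)) (hw : w ∈ L.map (fun p => p.2))
    (h : pvGKey L v = pvGKey L w) : v = w := by
  have h1 := List.mem_of_find?_eq_some (pvFind_eq L v hv)
  have h2 := List.mem_of_find?_eq_some (pvFind_eq L w hw)
  have := List.inj_on_of_nodup_map hnd h1 h2 (by simpa using h)
  simpa using congrArg Prod.snd this

lemma pvScanBreak_eq (L : List (String × Int)) (sd : PySem.Dict String Int) (val : Int) :
    pvScanBreak L sd val =
      match L.find? (fun p => p.2 == val) with
      | some p => sd.insert p.1 p.2
      | none => sd := by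
  induction L with
  | nil => simp [pvScanBreak]
  | cons q rest ih =>
    obtain ⟨k, v⟩ := q
    by_cases h : v = val
    · simp [pvScanBreak, h]
    · simp [pvScanBreak, h, ih]

lemma pvMapReplace (l : List (String × Int)) (k : String) (v : Int)
    (hnd : (l.map (fun p => p.1)).Nodup) (hm : (k, v) ∈ l) :
    l.map (fun p => if (p.1 == k) = true then (k, v) else p) = l := by
  induction l with
  | nil => simp at hm
  | cons q rest ih =>
    simp only [List.map_cons, List.nodup_cons] at hnd
    rcases List.mem_cons.mp hm with h | h
    · have hq1 : q.1 = k := by rw [← h]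
      have hk : k ∉ rest.map (fun p => p.1) := hq1 ▸ hnd.1
      have ht : ∀ p ∈ rest, (if (p.1 == k) = true then ((k, v) : String × Int) else p) = p := by
        intro p hp
        have hne : ¬ (p.1 == k) = true := by
          simp only [beq_iff_eq]
          intro he
          apply hk
          rw [← he]
          exact List.mem_map_of_mem hp
        simp [hne]
      rw [← h]
      simp only [List.map_cons, beq_self_eq_true, if_true]
      rw [List.map_congr_left ht]
      simp
    · have hqk : ¬ (q.1 == k) = true := by
        simp only [beq_iff_eq]
        intro he
        apply hnd.1
        rw [he]
        exact List.mem_map_of_mem h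
      simp only [List.map_cons]
      rw [if_neg hqk, ih hnd.2 h]

lemma pvReinsert (l : List (String × Int)) (k : String) (v : Int)
    (hnd : (l.map (fun p => p.1)).Nodup) (hm : (k, v) ∈ l) :
    (PySem.Dict.mk l).insert k v = PySem.Dict.mk l := by
  have hc : (PySem.Dict.mk l).contains k = true := by
    simp only [PySem.Dict.contains, List.any_eq_true]
    exact ⟨(k, v), hm, by simp⟩
  simp only [PySem.Dict.insert, hc, if_true]
  congr 1
  exact pvMapReplace l k v hnd hm

lemma pvFoldA (L : List (String × Int)) (hnd : (L.map (fun p => p.1)).Nodup) :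
    ∀ (ws p : List Int), (∀ v ∈ ws, v ∈ L.map (fun q => q.2)) →
      (∀ v ∈ p, v ∈ L.map (fun q => q.2)) → p.Nodup →
      (ws.foldl (fun sd val => pvScanBreak L sd val)
          (PySem.Dict.mk (p.map (fun v => (pvGKey L v, v))))).items
        = (PySem.Set.ofList (p ++ ws)).map (fun v => (pvGKey L v, v)) := by
  intro ws
  induction ws with
  | nil =>
    intro p _ hpm hp
    simp [PySem.Set.ofList_eq_self_of_nodup p hp]
  | cons v ws' ih =>
    intro p hws hpm hp
    have hv : v ∈ L.map (fun q => q.2) := hws v List.mem_cons_self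
    have hstep : pvScanBreak L (PySem.Dict.mk (p.map (fun v => (pvGKey L v, v)))) v
        = (PySem.Dict.mk (p.map (fun v => (pvGKey L v, v)))).insert (pvGKey L v) v := by
      rw [pvScanBreak_eq, pvFind_eq L v hv]
    rw [List.foldl_cons, hstep]
    by_cases hvp : v ∈ p
    · have hknd : ((p.map (fun v => (pvGKey L v, v))).map (fun q => q.1)).Nodup := by
        rw [List.map_map]
        exact List.Nodup.map_on
          (fun x hx y hy hxy => pvGKey_inj L hnd (hpm x hx) (hpm y hy) hxy) hp
      have hset : PySem.Set.ofList (p ++ v :: ws') = PySem.Set.ofList (p ++ ws') := by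
        have hmem : v ∈ List.foldl PySem.Set.add ([] : List Int) p := by
          simpa [PySem.Set.ofList, PySem.Set.empty] using (PySem.Set.mem_ofList p v).mpr hvp
        have hadd : PySem.Set.add (List.foldl PySem.Set.add ([] : List Int) p) v
            = List.foldl PySem.Set.add ([] : List Int) p := by
          simp [PySem.Set.add, hmem]
        simp only [PySem.Set.ofList, PySem.Set.empty, List.foldl_append, List.foldl_cons]
        rw [hadd]
      rw [pvReinsert _ _ _ hknd (List.mem_map_of_mem hvp), hset]
      exact ih p (fun x hx => hws x (List.mem_cons_of_mem _ hx)) hpm hp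
    · have hfresh : (PySem.Dict.mk (p.map (fun v => (pvGKey L v, v)))).contains (pvGKey L v) = false := by
        simp only [PySem.Dict.contains, List.any_eq_false]
        rintro ⟨a, b⟩ hab
        obtain ⟨x, hx, hxe⟩ := List.mem_map.mp hab
        simp only [Prod.mk.injEq] at hxe
        simp only [beq_iff_eq]
        intro he
        rw [← hxe.1] at he
        exact hvp ((pvGKey_inj L hnd (hpm x hx) hv he) ▸ hx)
      have hins : (PySem.Dict.mk (p.map (fun v => (pvGKey L v, v)))).insert (pvGKey L v) v
          = PySem.Dict.mk ((p ++ [v]).map (fun v => (pvGKey L v, v))) := by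
        simp [PySem.Dict.insert, hfresh]
      rw [hins]
      rw [ih (p ++ [v]) (fun x hx => hws x (List.mem_cons_of_mem _ hx))
            (by intro x hx
                rcases List.mem_append.mp hx with h | h
                · exact hpm x h
                · simp only [List.mem_singleton] at h
                  exact h ▸ hv)
            (by simp [List.nodup_append, hp]
                exact fun a ha he => hvp (he ▸ ha))]
      congr 2
      simp

def pvFirstOcc : List (String × Int) → List Int → List (Int × String)
  | [], _ => []
  | (k, v) :: rest, seen =>
      if v ∈ seen then pvFirstOcc rest seen else (v, k) :: pvFirstOcc rest (seen ++ [v])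

lemma pvFoldB (L : List (String × Int)) :
    ∀ (q : List (Int × String)),
      (L.foldl (fun fk kv => if fk.contains kv.2 then fk else fk.insert kv.2 kv.1)
          (PySem.Dict.mk q)).items
        = q ++ pvFirstOcc L (q.map (fun x => x.1)) := by
  induction L with
  | nil => intro q; simp [pvFirstOcc]
  | cons kv rest ih =>
    intro q
    obtain ⟨k, v⟩ := kv
    rw [List.foldl_cons]
    by_cases hv : v ∈ q.map (fun x => x.1)
    · have hc : (PySem.Dict.mk q).contains v = true := by
        simp only [PySem.Dict.contains, List.any_eq_true]
        obtain ⟨x, hx, hxe⟩ := List.mem_map.mp hv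
        exact ⟨x, hx, by simp [hxe]⟩
      simp only [hc, if_true]
      rw [ih q]
      simp [pvFirstOcc, hv]
    · have hc : (PySem.Dict.mk q).contains v = false := by
        simp only [PySem.Dict.contains, List.any_eq_false]
        rintro ⟨a, b⟩ hab
        simp only [beq_iff_eq]
        intro he
        exact hv (he ▸ List.mem_map_of_mem hab)
      simp only [hc, Bool.false_eq_true, if_false]
      have hins : (PySem.Dict.mk q).insert v k = PySem.Dict.mk (q ++ [(v, k)]) := by
        simp [PySem.Dict.insert, hc]
      rw [hins, ih (q ++ [(v, k)])]
      simp [pvFirstOcc, hv]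

lemma pvFirstOcc_keys (L : List (String × Int)) :
    ∀ (seen : List Int),
      seen ++ (pvFirstOcc L seen).map (fun x => x.1)
        = List.foldl PySem.Set.add seen (L.map (fun q => q.2)) := by
  induction L with
  | nil => intro seen; simp [pvFirstOcc]
  | cons kv rest ih =>
    intro seen
    obtain ⟨k, v⟩ := kv
    by_cases hv : v ∈ seen
    · have hadd : PySem.Set.add seen v = seen := by
        simp [PySem.Set.add, hv]
      simp [pvFirstOcc, hv, ih seen]
    · have hadd : PySem.Set.add seen v = seen ++ [v] := by
        simp [PySem.Set.add, hv]
      simp only [List.map_cons, List.foldl_cons, hadd, ← ih (seen ++ [v])]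
      simp [pvFirstOcc, hv]

lemma pvFirstOcc_not_seen (L : List (String × Int)) :
    ∀ (seen : List Int) (v : Int) (k : String), (v, k) ∈ pvFirstOcc L seen → v ∉ seen := by
  induction L with
  | nil => intro seen v k h; simp [pvFirstOcc] at h
  | cons kv rest ih =>
    intro seen v k h
    obtain ⟨k0, v0⟩ := kv
    by_cases hv0 : v0 ∈ seen
    · simp only [pvFirstOcc, hv0, if_true] at h
      exact ih seen v k h
    · simp only [pvFirstOcc, hv0, if_false] at h
      rcases List.mem_cons.mp h with he | h
      · simp only [Prod.mk.injEq] at he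
        exact he.1 ▸ hv0
      · intro hs
        exact ih (seen ++ [v0]) v k h (List.mem_append_left _ hs)

lemma pvFirstOcc_find (L : List (String × Int)) :
    ∀ (seen : List Int) (v : Int) (k : String), (v, k) ∈ pvFirstOcc L seen →
      L.find? (fun p => p.2 == v) = some (k, v) := by
  induction L with
  | nil => intro seen v k h; simp [pvFirstOcc] at h
  | cons kv rest ih =>
    intro seen v k h
    obtain ⟨k0, v0⟩ := kv
    by_cases hv0 : v0 ∈ seen
    · simp only [pvFirstOcc, hv0, if_true] at h
      have hne : ¬ (v0 = v) := fun he => pvFirstOcc_not_seen rest seen v k h (he ▸ hv0)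
      rw [List.find?_cons_of_neg (by simp [hne])]
      exact ih seen v k h
    · simp only [pvFirstOcc, hv0, if_false] at h
      rcases List.mem_cons.mp h with he | h
      · simp only [Prod.mk.injEq] at he
        rw [List.find?_cons_of_pos (by simp [he.1])]
        simp [he.1, he.2]
      · have hvn : v ∉ seen ++ [v0] := pvFirstOcc_not_seen rest (seen ++ [v0]) v k h
        have hne : ¬ (v0 = v) := fun he => hvn (he ▸ List.mem_append_right _ (by simp))
        rw [List.find?_cons_of_neg (by simp [hne])]
        exact ih (seen ++ [v0]) v k h

lemma pvOfList_sublist {α : Type} [BEq α] [LawfulBEq α] (xs : List α) :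
    ∀ s : List α, ∃ t, List.foldl PySem.Set.add s xs = s ++ t ∧ t.Sublist xs := by
  induction xs with
  | nil => intro s; exact ⟨[], by simp, List.Sublist.refl _⟩
  | cons x xs' ih =>
    intro s
    rw [List.foldl_cons]
    by_cases hc : x ∈ s
    · have : PySem.Set.add s x = s := by simp [PySem.Set.add, hc]
      rw [this]
      obtain ⟨t, ht, hs⟩ := ih s
      exact ⟨t, ht, hs.cons x⟩
    · have : PySem.Set.add s x = s ++ [x] := by simp [PySem.Set.add, hc]
      rw [this]
      obtain ⟨t, ht, hs⟩ := ih (s ++ [x])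
      exact ⟨x :: t, by simp [ht], hs.cons₂ x⟩

lemma pvSlice_map {α β : Type} (f : α → β) (xs : List α) (a b : Option Int) :
    PySem.List.slice (xs.map f) a b = (PySem.List.slice xs a b).map f := by
  simp [PySem.List.slice, List.map_take, List.map_drop]

lemma pvSorted_ofList (vs : List Int) :
    PySem.List.sorted (PySem.Set.ofList vs) (fun v => v) false
      = PySem.Set.ofList (PySem.List.sorted vs (fun v => v) false) := by
  apply PySem.List.sorted_eq_of_perm_of_pairwise_lt
  · apply (List.perm_ext_iff_of_nodup (PySem.Set.nodup_ofList _) (PySem.Set.nodup_ofList _)).mpr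
    intro a
    simp [PySem.Set.mem_ofList, PySem.List.mem_sorted]
  · obtain ⟨t, ht, hs⟩ := pvOfList_sublist (PySem.List.sorted vs (fun v => v) false) []
    have hofl : PySem.Set.ofList (PySem.List.sorted vs (fun v => v) false) = t := by
      simpa [PySem.Set.ofList, PySem.Set.empty] using ht
    rw [hofl]
    have hle : t.Pairwise (fun a b : Int => a ≤ b) :=
      (PySem.List.sorted_pairwise vs (fun v => v)).sublist hs
    have hnd : t.Nodup := hofl ▸ PySem.Set.nodup_ofList _
    exact (hle.and hnd).imp (fun h => lt_of_le_of_ne h.1 h.2)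

-- ===== VERDICT (by name: the statement is the Claim_ definition above) =====
theorem get_keys_with_largest_values2_spec : Claim_equal_get_keys_with_largest_values2 := by
  intro input_dict _
  unfold Spec_get_keys_with_largest_values2 get_keys_with_largest_values2 get_keys_with_largest_values2_alt
  have hnd0 := PySem.Dict.nodup_keys_ofList (ν := Int) input_dict
  simp only [PySem.Dict.values, PySem.Dict.keys] at hnd0 ⊢
  generalize hLe : (PySem.Dict.ofList input_dict).items = L at hnd0 ⊢
  rw [show (PySem.Dict.empty : PySem.Dict String Int) = PySem.Dict.mk [] from rfl,
      show (PySem.Dict.empty : PySem.Dict Int String) = PySem.Dict.mk [] from rfl]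
  have hA := pvFoldA L hnd0 (PySem.List.sorted (L.map (fun x => x.2)) (fun v => v) false) []
    (fun v hv => (PySem.List.mem_sorted _ _ _ v).mp hv)
    (by simp) List.nodup_nil
  simp only [List.map_nil, List.nil_append] at hA
  have hB := pvFoldB L []
  simp only [List.map_nil, List.nil_append] at hB
  have hBd : (List.foldl (fun fk kv => if fk.contains kv.2 = true then fk else fk.insert kv.2 kv.1)
      (PySem.Dict.mk []) L) = PySem.Dict.mk (pvFirstOcc L []) := PySem.Dict.ext hB
  rw [hA, hBd]
  have hBkeys : (pvFirstOcc L []).map (fun x => x.1)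
      = PySem.Set.ofList (L.map (fun q => q.2)) := by
    simpa [PySem.Set.ofList, PySem.Set.empty] using pvFirstOcc_keys L []
  rw [hBkeys, pvSorted_ofList]
  rw [List.map_map, pvSlice_map]
  apply List.map_congr_left
  intro v hv
  have hvS : v ∈ PySem.Set.ofList (PySem.List.sorted (L.map (fun x => x.2)) (fun v => v) false) := by
    simp only [PySem.List.slice] at hv
    exact List.mem_of_mem_drop (List.mem_of_mem_take hv)
  have hvv : v ∈ L.map (fun q => q.2) := by
    have := (PySem.Set.mem_ofList _ v).mp hvS
    simpa [PySem.List.mem_sorted] using this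
  have hvk : v ∈ (pvFirstOcc L []).map (fun x => x.1) := by
    rw [hBkeys]
    exact (PySem.Set.mem_ofList _ v).mpr hvv
  obtain ⟨⟨v', k⟩, hm, hve⟩ := List.mem_map.mp hvk
  simp only at hve
  rw [hve] at hm
  have hfind := pvFirstOcc_find L [] v k hm
  have hknd : ((PySem.Dict.mk (pvFirstOcc L [])).keys).Nodup := by
    simp only [PySem.Dict.keys]
    exact hBkeys ▸ PySem.Set.nodup_ofList _
  have hgets : (PySem.Dict.mk (pvFirstOcc L [])).get? v = some k :=
    PySem.Dict.get?_of_mem_items (PySem.Dict.mk (pvFirstOcc L [])) hm hknd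
  simp [hgets, pvGKey, hfind]
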